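-- pv_equiv track=rewrite | github.com/Julien-MKT-samedia/samedia-entretiens-2026 | rescore_dylan.py | score_criteria
-- ===== SOURCE A (Python) =====
-- def score_criteria(cand_data):
--     """Score 6 criteria, each 0-2."""
--     text = " ".join([
--         " ".join(cand_data.get('education', [])),
--         " ".join(cand_data.get('experiences', [])),
--         " ".join(cand_data.get('languages', [])),
--         " ".join(cand_data.get('skills', [])),
--     ]).lower()
--
--     scores = {}
--
--     # 1. Langues
--     text_lang = " ".join(cand_data.get('languages', [])).lower()
--     if any(x in text_lang for x in ['c1', 'c2', 'native', 'bilingual']):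
--         scores['langues'] = 2
--     elif any(x in text_lang for x in ['b1', 'b2', 'fluent', 'professional']):
--         scores['langues'] = 1
--     else:
--         scores['langues'] = 0
--
--     # 2. Vente
--     if any(x in text for x in ['sales manager', 'business development', 'account executive', 'b2b']):
--         scores['vente'] = 2
--     elif any(x in text for x in ['sales', 'commercial', 'client']):
--         scores['vente'] = 1
--     else:
--         scores['vente'] = 0
--
--     # 3. Prospection
--     if any(x in text for x in ['prospecting', 'field', 'territory', 'hunting', 'new business']):
--         scores['prospection'] = 2
--     elif any(x in text for x in ['support', 'back office']):
--         scores['prospection'] = 1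
--     else:
--         scores['prospection'] = 0
--
--     # 4. USA Experience
--     usa_text = text
--     if any(x in usa_text for x in ['usa', 'united states', 'new york', 'los angeles', 'chicago']):
--         scores['usa_exp'] = 2
--     elif any(x in usa_text for x in ['uk', 'canada', 'australia', 'ireland']):
--         scores['usa_exp'] = 1
--     else:
--         scores['usa_exp'] = 0
--
--     # 5. Profil Marche (BTP/construction) — min 1
--     if any(x in text for x in ['construction', 'mining', 'drilling', 'concrete', 'btp', 'machinery']):
--         scores['profil_marche'] = 2
--     else:
--         scores['profil_marche'] = 1  # Default, never 0
--
--     # 6. Ancrage culturel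
--     if any(x in text for x in ['british', 'american', 'australian', 'canadian', 'irish']):
--         scores['ancrage_culturel'] = 2
--     elif any(x in text for x in ['international', 'expat', 'multinational']):
--         scores['ancrage_culturel'] = 1
--     else:
--         scores['ancrage_culturel'] = 0
--
--     return scores
-- ===== SOURCE B (Python) =====
-- def score_criteria(cand_data):
--     """Score 6 criteria, each 0-2: max matched points over a flat keyword rulebook."""
--     full = " ".join(" ".join(cand_data.get(k, []))
--                     for k in ('education', 'experiences', 'languages', 'skills')).lower()
--     lang = " ".join(cand_data.get('languages', [])).lower()
--
--     def best(text, start, rules):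
--         # monotone max-accumulation: order of rules is irrelevant
--         score = start
--         for kw, pts in rules:
--             if pts > score and kw in text:
--                 score = pts
--         return score
--
--     return {
--         'langues': best(lang, 0,
--             [('b1', 1), ('b2', 1), ('fluent', 1), ('professional', 1),
--              ('c1', 2), ('c2', 2), ('native', 2), ('bilingual', 2)]),
--         'vente': best(full, 0,
--             [('sales', 1), ('commercial', 1), ('client', 1),
--              ('sales manager', 2), ('business development', 2),
--              ('account executive', 2), ('b2b', 2)]),
--         'prospection': best(full, 0,
--             [('support', 1), ('back office', 1),
--              ('prospecting', 2), ('field', 2), ('territory', 2),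
--              ('hunting', 2), ('new business', 2)]),
--         'usa_exp': best(full, 0,
--             [('uk', 1), ('canada', 1), ('australia', 1), ('ireland', 1),
--              ('usa', 2), ('united states', 2), ('new york', 2),
--              ('los angeles', 2), ('chicago', 2)]),
--         'profil_marche': best(full, 1,
--             [('construction', 2), ('mining', 2), ('drilling', 2),
--              ('concrete', 2), ('btp', 2), ('machinery', 2)]),
--         'ancrage_culturel': best(full, 0,
--             [('international', 1), ('expat', 1), ('multinational', 1),
--              ('british', 2), ('american', 2), ('australian', 2),
--              ('canadian', 2), ('irish', 2)]),
--     }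
-- ===== Notes on version B (the rewrite author's own statement) =====
-- stated objective: alternative
-- what changed: Replaced A's six if/elif/else first-match tier blocks by a flat (keyword, points) rulebook per criterion folded with a monotone max accumulator (scores built from defaults upward, rules in ascending-points order, so rule order is irrelevant), correct because descending first-match equals the maximum matched points.
import Mathlib
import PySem

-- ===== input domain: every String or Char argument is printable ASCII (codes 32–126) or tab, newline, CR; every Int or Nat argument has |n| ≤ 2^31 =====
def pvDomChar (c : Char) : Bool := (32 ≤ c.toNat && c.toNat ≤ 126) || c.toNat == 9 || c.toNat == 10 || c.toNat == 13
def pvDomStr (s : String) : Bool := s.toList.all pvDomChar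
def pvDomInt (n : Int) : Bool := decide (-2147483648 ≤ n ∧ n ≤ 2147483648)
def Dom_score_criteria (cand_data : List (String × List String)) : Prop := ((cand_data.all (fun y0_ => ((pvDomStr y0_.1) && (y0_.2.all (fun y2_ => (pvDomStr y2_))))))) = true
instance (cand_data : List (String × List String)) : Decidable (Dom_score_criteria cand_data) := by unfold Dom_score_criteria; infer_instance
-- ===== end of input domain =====

-- B replaces A's six tiered if/elif first-match blocks by a flat (keyword, points) rulebook per
-- criterion folded with a monotone max accumulator (objective: alternative); same output.


-- ===== PORT A =====
def score_criteria (cand_data : List (String × List String)) : List (String × Int) :=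
  let d := PySem.Dict.mk cand_data
  let text := PySem.Str.lower (PySem.Str.join " " [
      PySem.Str.join " " (d.getD "education" []),
      PySem.Str.join " " (d.getD "experiences" []),
      PySem.Str.join " " (d.getD "languages" []),
      PySem.Str.join " " (d.getD "skills" [])])
  let scores : PySem.Dict String Int := PySem.Dict.empty
  -- 1. Langues
  let text_lang := PySem.Str.lower (PySem.Str.join " " (d.getD "languages" []))
  let scores :=
    if ["c1", "c2", "native", "bilingual"].any (fun x => PySem.Str.isIn x text_lang) then
      scores.insert "langues" 2
    else if ["b1", "b2", "fluent", "professional"].any (fun x => PySem.Str.isIn x text_lang) then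
      scores.insert "langues" 1
    else scores.insert "langues" 0
  -- 2. Vente
  let scores :=
    if ["sales manager", "business development", "account executive", "b2b"].any (fun x => PySem.Str.isIn x text) then
      scores.insert "vente" 2
    else if ["sales", "commercial", "client"].any (fun x => PySem.Str.isIn x text) then
      scores.insert "vente" 1
    else scores.insert "vente" 0
  -- 3. Prospection
  let scores :=
    if ["prospecting", "field", "territory", "hunting", "new business"].any (fun x => PySem.Str.isIn x text) then
      scores.insert "prospection" 2
    else if ["support", "back office"].any (fun x => PySem.Str.isIn x text) then
      scores.insert "prospection" 1
    else scores.insert "prospection" 0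
  -- 4. USA Experience
  let usa_text := text
  let scores :=
    if ["usa", "united states", "new york", "los angeles", "chicago"].any (fun x => PySem.Str.isIn x usa_text) then
      scores.insert "usa_exp" 2
    else if ["uk", "canada", "australia", "ireland"].any (fun x => PySem.Str.isIn x usa_text) then
      scores.insert "usa_exp" 1
    else scores.insert "usa_exp" 0
  -- 5. Profil Marche -- min 1
  let scores :=
    if ["construction", "mining", "drilling", "concrete", "btp", "machinery"].any (fun x => PySem.Str.isIn x text) then
      scores.insert "profil_marche" 2
    else scores.insert "profil_marche" 1
  -- 6. Ancrage culturel
  let scores :=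
    if ["british", "american", "australian", "canadian", "irish"].any (fun x => PySem.Str.isIn x text) then
      scores.insert "ancrage_culturel" 2
    else if ["international", "expat", "multinational"].any (fun x => PySem.Str.isIn x text) then
      scores.insert "ancrage_culturel" 1
    else scores.insert "ancrage_culturel" 0
  scores.items

-- ===== PORT B =====
-- Source B's `best`: monotone max accumulation over a flat (keyword, points) rulebook
def pvBest (text : String) (start : Int) (rules : List (String × Int)) : Int :=
  rules.foldl (fun score p => if p.2 > score && PySem.Str.isIn p.1 text then p.2 else score) start

def score_criteria_alt (cand_data : List (String × List String)) : List (String × Int) :=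
  let d := PySem.Dict.mk cand_data
  let full := PySem.Str.lower (PySem.Str.join " "
      (["education", "experiences", "languages", "skills"].map
        (fun k => PySem.Str.join " " (d.getD k []))))
  let lang := PySem.Str.lower (PySem.Str.join " " (d.getD "languages" []))
  [("langues", pvBest lang 0
      [("b1", 1), ("b2", 1), ("fluent", 1), ("professional", 1),
       ("c1", 2), ("c2", 2), ("native", 2), ("bilingual", 2)]),
   ("vente", pvBest full 0
      [("sales", 1), ("commercial", 1), ("client", 1),
       ("sales manager", 2), ("business development", 2),
       ("account executive", 2), ("b2b", 2)]),
   ("prospection", pvBest full 0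
      [("support", 1), ("back office", 1),
       ("prospecting", 2), ("field", 2), ("territory", 2),
       ("hunting", 2), ("new business", 2)]),
   ("usa_exp", pvBest full 0
      [("uk", 1), ("canada", 1), ("australia", 1), ("ireland", 1),
       ("usa", 2), ("united states", 2), ("new york", 2),
       ("los angeles", 2), ("chicago", 2)]),
   ("profil_marche", pvBest full 1
      [("construction", 2), ("mining", 2), ("drilling", 2),
       ("concrete", 2), ("btp", 2), ("machinery", 2)]),
   ("ancrage_culturel", pvBest full 0
      [("international", 1), ("expat", 1), ("multinational", 1),
       ("british", 2), ("american", 2), ("australian", 2),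
       ("canadian", 2), ("irish", 2)])]

-- ===== PRECONDITION & SPEC =====
def Spec_score_criteria (cand_data : List (String × List String)) (out : List (String × Int)) : Prop := out = score_criteria_alt cand_data
instance (cand_data : List (String × List String)) (out : List (String × Int)) : Decidable (Spec_score_criteria cand_data out) := by unfold Spec_score_criteria; infer_instance

-- ===== CLAIM (what is proved, stated in full; the proofs are below) =====
def Claim_equal_score_criteria : Prop := ∀ (cand_data : List (String × List String)), Dom_score_criteria cand_data → Spec_score_criteria cand_data (score_criteria cand_data)

-- ===== LEMMAS AND PROOFS =====

-- an if that inserts the same fresh key two ways is one insert of an if-valued score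
theorem pv_ite_ins2 {κ ν : Type} [BEq κ] (d : PySem.Dict κ ν) (k : κ) (c : Prop)
    [Decidable c] (a b : ν) :
    (if c then d.insert k a else d.insert k b) = d.insert k (if c then a else b) := by
  split_ifs <;> rfl

-- items of the six-fresh-key insert chain A builds, in insertion order
theorem pv_items6 (a b c d e f : Int) :
    ((((((PySem.Dict.empty.insert "langues" a).insert "vente" b).insert "prospection" c).insert
        "usa_exp" d).insert "profil_marche" e).insert "ancrage_culturel" f).items =
      [("langues", a), ("vente", b), ("prospection", c), ("usa_exp", d),
       ("profil_marche", e), ("ancrage_culturel", f)] := by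
  rw [PySem.Dict.items_insert_of_not_contains, PySem.Dict.items_insert_of_not_contains,
      PySem.Dict.items_insert_of_not_contains, PySem.Dict.items_insert_of_not_contains,
      PySem.Dict.items_insert_of_not_contains, PySem.Dict.items_insert_of_not_contains] <;>
    simp [PySem.Dict.contains_insert, PySem.Dict.empty]

-- folding one tier (all rules carry the same points s) in pvBest's max accumulator
theorem pvBest_const (text : String) (s : Int) (kws : List String) (acc : Int) :
    List.foldl (fun score p => if p.2 > score && PySem.Str.isIn p.1 text then p.2 else score)
        acc (kws.map (fun k => (k, s))) =
      if acc < s ∧ kws.any (fun x => PySem.Str.isIn x text) then s else acc := by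
  induction kws generalizing acc with
  | nil => simp
  | cons k rest ih =>
    simp only [List.map_cons, List.foldl_cons, List.any_cons, Bool.or_eq_true]
    cases h2 : PySem.Str.isIn k text with
    | true =>
      by_cases h1 : acc < s
      · rw [if_pos (by rw [Bool.and_true]; exact decide_eq_true h1), ih,
            if_neg (fun h => lt_irrefl s h.1), if_pos ⟨h1, Or.inl rfl⟩]
      · rw [if_neg (fun h => by rw [decide_eq_false h1, Bool.false_and] at h; exact Bool.false_ne_true h),
            ih, if_neg (fun h => h1 h.1), if_neg (fun h => h1 h.1)]
    | false =>
      rw [if_neg (fun h => by rw [Bool.and_false] at h; exact Bool.false_ne_true h), ih]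
      simp only [Bool.false_eq_true, false_or]

-- the max over a two-tier rulebook equals the descending first-match if-chain
theorem pvBest_tiered (text : String) (kws1 kws2 : List String) :
    pvBest text 0 (kws1.map (fun k => (k, 1)) ++ kws2.map (fun k => (k, 2))) =
      if kws2.any (fun x => PySem.Str.isIn x text) then 2
      else if kws1.any (fun x => PySem.Str.isIn x text) then 1 else 0 := by
  unfold pvBest
  rw [List.foldl_append, pvBest_const, pvBest_const]
  by_cases h1 : (kws1.any fun x => PySem.Str.isIn x text) = true <;>
    by_cases h2 : (kws2.any fun x => PySem.Str.isIn x text) = true <;>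
    simp only [h1, h2] <;> norm_num

-- one tier of 2-point rules starting from the default 1 (profil_marche)
theorem pvBest_one1 (text : String) (kws : List String) :
    pvBest text 1 (kws.map (fun k => (k, 2))) =
      if kws.any (fun x => PySem.Str.isIn x text) then 2 else 1 := by
  unfold pvBest
  rw [pvBest_const]
  by_cases h : (kws.any fun x => PySem.Str.isIn x text) = true <;>
    simp only [h] <;> norm_num

-- the six concrete rulebooks, bridged to the tiered form (lists are definitionally map ++ map)
theorem pvB1 (t : String) : pvBest t 0
    [("b1", 1), ("b2", 1), ("fluent", 1), ("professional", 1),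
     ("c1", 2), ("c2", 2), ("native", 2), ("bilingual", 2)] =
    (if ["c1", "c2", "native", "bilingual"].any (fun x => PySem.Str.isIn x t) then 2
     else if ["b1", "b2", "fluent", "professional"].any (fun x => PySem.Str.isIn x t) then 1 else 0) :=
  pvBest_tiered t ["b1", "b2", "fluent", "professional"] ["c1", "c2", "native", "bilingual"]

theorem pvB2 (t : String) : pvBest t 0
    [("sales", 1), ("commercial", 1), ("client", 1),
     ("sales manager", 2), ("business development", 2), ("account executive", 2), ("b2b", 2)] =
    (if ["sales manager", "business development", "account executive", "b2b"].any (fun x => PySem.Str.isIn x t) then 2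
     else if ["sales", "commercial", "client"].any (fun x => PySem.Str.isIn x t) then 1 else 0) :=
  pvBest_tiered t ["sales", "commercial", "client"]
    ["sales manager", "business development", "account executive", "b2b"]

theorem pvB3 (t : String) : pvBest t 0
    [("support", 1), ("back office", 1),
     ("prospecting", 2), ("field", 2), ("territory", 2), ("hunting", 2), ("new business", 2)] =
    (if ["prospecting", "field", "territory", "hunting", "new business"].any (fun x => PySem.Str.isIn x t) then 2
     else if ["support", "back office"].any (fun x => PySem.Str.isIn x t) then 1 else 0) :=
  pvBest_tiered t ["support", "back office"]
    ["prospecting", "field", "territory", "hunting", "new business"]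

theorem pvB4 (t : String) : pvBest t 0
    [("uk", 1), ("canada", 1), ("australia", 1), ("ireland", 1),
     ("usa", 2), ("united states", 2), ("new york", 2), ("los angeles", 2), ("chicago", 2)] =
    (if ["usa", "united states", "new york", "los angeles", "chicago"].any (fun x => PySem.Str.isIn x t) then 2
     else if ["uk", "canada", "australia", "ireland"].any (fun x => PySem.Str.isIn x t) then 1 else 0) :=
  pvBest_tiered t ["uk", "canada", "australia", "ireland"]
    ["usa", "united states", "new york", "los angeles", "chicago"]

theorem pvB5 (t : String) : pvBest t 1
    [("construction", 2), ("mining", 2), ("drilling", 2), ("concrete", 2), ("btp", 2), ("machinery", 2)] =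
    (if ["construction", "mining", "drilling", "concrete", "btp", "machinery"].any (fun x => PySem.Str.isIn x t) then 2 else 1) :=
  pvBest_one1 t ["construction", "mining", "drilling", "concrete", "btp", "machinery"]

theorem pvB6 (t : String) : pvBest t 0
    [("international", 1), ("expat", 1), ("multinational", 1),
     ("british", 2), ("american", 2), ("australian", 2), ("canadian", 2), ("irish", 2)] =
    (if ["british", "american", "australian", "canadian", "irish"].any (fun x => PySem.Str.isIn x t) then 2
     else if ["international", "expat", "multinational"].any (fun x => PySem.Str.isIn x t) then 1 else 0) :=
  pvBest_tiered t ["international", "expat", "multinational"]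
    ["british", "american", "australian", "canadian", "irish"]

-- ===== VERDICT (by name: the statement is the Claim_ definition above) =====
theorem score_criteria_spec : Claim_equal_score_criteria := by
  intro cand_data _
  unfold Spec_score_criteria score_criteria score_criteria_alt
  simp only [List.map, pv_ite_ins2, pv_items6, pvB1, pvB2, pvB3, pvB4, pvB5, pvB6]
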